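-- pv_equiv track=rewrite | github.com/muneebaifrah/Unstop-100-Days-Coding-Sprint | Day-69/1.Count_Repetitions.py | number_of_days_when_subsequence
-- ===== SOURCE A (Python) =====
-- def number_of_days_when_subsequence(S, T):
--     n, m = len(S), len(T)
--
--     ALPHA = 26
--     nxt = [[-1] * ALPHA for _ in range(n + 1)]
--     for c in range(ALPHA):
--         nxt[n][c] = -1
--     for i in range(n - 1, -1, -1):
--         for c in range(ALPHA):
--             nxt[i][c] = nxt[i + 1][c]
--         nxt[i][ord(S[i]) - ord('a')] = i
--
--     present = set(S)
--     for ch in T: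
--         if ch not in present:
--             return -1
--
--     days = 1
--     pos = 0
--
--     for ch in T:
--         idx = ord(ch) - ord('a')
--         if pos == n:
--             days += 1
--             pos = 0
--         if nxt[pos][idx] != -1:
--             pos = nxt[pos][idx] + 1
--         else:
--             days += 1
--             pos = 0
--             pos = nxt[pos][idx] + 1
--
--     return days
-- ===== SOURCE B (Python) =====
-- def number_of_days_when_subsequence(S, T):
--     present = set(S)
--     for ch in T:
--         if ch not in present:
--             return -1
--     n = len(S)
--     days = 1
--     pos = 0
--     for ch in T:
--         i = pos
--         while i < n and S[i] != ch:
--             i += 1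
--         if i == n:
--             days += 1
--             i = 0
--             while i < n and S[i] != ch:
--                 i += 1
--         pos = i + 1
--     return days
-- ===== Notes on version B (the rewrite author's own statement) =====
-- stated objective: simpler
-- what changed: B drops A's precomputed 26x(n+1) next-occurrence jump table and instead scans S forward from the current position for each character of T (wrapping to a new day when the scan runs off the end), keeping only the up-front presence check; skipping the 26n-entry table build also made B measurably faster on the generated inputs.
-- outside the precondition, e.g. on number_of_days_when_subsequence('Ga', 'aa'): A returns 1, B returns 2; on number_of_days_when_subsequence('`a', 'aa'): A returns 2, B returns 2
import Mathlib
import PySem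

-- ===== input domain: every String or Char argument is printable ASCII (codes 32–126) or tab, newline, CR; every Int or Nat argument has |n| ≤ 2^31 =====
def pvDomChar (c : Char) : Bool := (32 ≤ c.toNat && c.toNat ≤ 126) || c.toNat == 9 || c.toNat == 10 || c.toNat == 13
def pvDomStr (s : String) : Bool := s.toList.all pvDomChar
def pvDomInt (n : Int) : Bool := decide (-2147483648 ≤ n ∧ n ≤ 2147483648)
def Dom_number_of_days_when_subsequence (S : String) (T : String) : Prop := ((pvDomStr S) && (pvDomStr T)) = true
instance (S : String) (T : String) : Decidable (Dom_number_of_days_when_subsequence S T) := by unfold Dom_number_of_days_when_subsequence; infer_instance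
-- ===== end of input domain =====

-- B replaces A's precomputed 26×(n+1) next-occurrence jump table by direct forward scans of S (objective: simpler).


-- ===== PORT A =====
-- the backward table-building loop: row i is a copy of row i+1 with slot ord(S[i])-97 set to i
-- (the row assignment nxt[i][idx] = i is Python item assignment: PySem.List.pySetD, negative idx wraps)
def pvBuildNxt (s : List Char) (i : Int) : List (List Int) :=
  match s with
  | [] => [List.replicate 26 (-1)]
  | c :: rest =>
    let tl := pvBuildNxt rest (i + 1)
    PySem.List.pySetD (tl.headD []) ((c.toNat : Int) - 97) i :: tl


-- nxt[p][idx]; both reads are in range on every input admitted by Pre_ (the defaults are unreachable there)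
def pvNxtGet (nxt : List (List Int)) (p : Int) (idx : Int) : Int :=
  (PySem.List.pyGet? ((PySem.List.pyGet? nxt p).getD []) idx).getD 0


-- one iteration of A's `for ch in T` loop, state = (days, pos)
def pvStepA (n : Int) (nxt : List (List Int)) (st : Int × Int) (ch : Char) : Int × Int :=
  let idx : Int := (ch.toNat : Int) - 97
  let days := st.1
  let pos := st.2
  let days2 := if pos == n then days + 1 else days
  let pos2 := if pos == n then 0 else pos
  if pvNxtGet nxt pos2 idx != -1 then (days2, pvNxtGet nxt pos2 idx + 1)
  else (days2 + 1, pvNxtGet nxt 0 idx + 1)  -- else: days += 1; pos = 0; pos = nxt[pos][idx] + 1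


def number_of_days_when_subsequence (S : String) (T : String) : Int :=
  let s := S.toList
  let nxt := pvBuildNxt s 0
  if T.toList.any (fun ch => !(s.contains ch)) then -1  -- present = set(S); return -1 on a missing char of T
  else (T.toList.foldl (pvStepA (s.length : Int) nxt) (1, 0)).1

-- ===== PORT B =====
-- `i = pos; while i < n and S[i] != ch: i += 1` — recursion over the remaining characters, i the absolute index
def pvScan (l : List Char) (ch : Char) (i : Int) : Int :=
  match l with
  | [] => -1
  | c :: rest => if c == ch then i else pvScan rest ch (i + 1)


-- one iteration of B's `for ch in T` loop, state = (days, pos)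
def pvStepB (s : List Char) (st : Int × Int) (ch : Char) : Int × Int :=
  let days := st.1
  let pos := st.2
  let i := pvScan (s.drop pos.toNat) ch pos
  if i == -1 then (days + 1, pvScan s ch 0 + 1)
  else (days, i + 1)


def number_of_days_when_subsequence_alt (S : String) (T : String) : Int :=
  let s := S.toList
  if T.toList.any (fun ch => !(s.contains ch)) then -1
  else (T.toList.foldl (pvStepB s) (1, 0)).1

-- ===== PRECONDITION & SPEC =====
-- Pre_ excludes strings S containing characters outside 'a'..'z': characters with code < 71 or > 122 make A
-- raise IndexError while building its 26-entry table, and characters 'G'..'`' are silently aliased onto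
-- lowercase slots by Python's negative-index wraparound — an accident of A's table no caller would specify.
def Pre_number_of_days_when_subsequence (S : String) (T : String) : Prop :=
  (S.toList.all (fun c => decide (97 ≤ c.toNat ∧ c.toNat ≤ 122))) = true
instance (S : String) (T : String) : Decidable (Pre_number_of_days_when_subsequence S T) := by
  unfold Pre_number_of_days_when_subsequence; infer_instance

def pvWitness_number_of_days_when_subsequence : String × String := ("abc", "cab")

def Spec_number_of_days_when_subsequence (S : String) (T : String) (out : Int) : Prop := out = number_of_days_when_subsequence_alt S T
instance (S : String) (T : String) (out : Int) : Decidable (Spec_number_of_days_when_subsequence S T out) := by unfold Spec_number_of_days_when_subsequence; infer_instance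

-- ===== CLAIM (what is proved, stated in full; the proofs are below) =====
def Claim_equal_number_of_days_when_subsequence : Prop := ∀ (S : String) (T : String), Dom_number_of_days_when_subsequence S T → Pre_number_of_days_when_subsequence S T → Spec_number_of_days_when_subsequence S T (number_of_days_when_subsequence S T)

-- ===== LEMMAS AND PROOFS =====

lemma pvBuildNxt_ne_nil (s : List Char) (i : Int) : pvBuildNxt s i ≠ [] := by
  cases s <;> simp [pvBuildNxt]


lemma pvBuildNxt_row_len (s : List Char) (i : Int) :
    ∀ r ∈ pvBuildNxt s i, r.length = 26 := by
  induction s generalizing i with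
  | nil => simp [pvBuildNxt]
  | cons c rest ih =>
    intro r hr
    simp only [pvBuildNxt, List.mem_cons] at hr
    rcases hr with h | h
    · subst h
      rw [PySem.List.length_pySetD]
      have hne := pvBuildNxt_ne_nil rest (i + 1)
      cases h : pvBuildNxt rest (i + 1) with
      | nil => exact absurd h hne
      | cons r0 rs =>
        have : r0 ∈ pvBuildNxt rest (i + 1) := by rw [h]; exact List.mem_cons_self
        simpa [h] using ih (i + 1) r0 this
    · exact ih (i + 1) r h


lemma pvScan_eq_neg_one_iff (l : List Char) (ch : Char) (b : Int) (hb : 0 ≤ b) :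
    pvScan l ch b = -1 ↔ ch ∉ l := by
  induction l generalizing b with
  | nil => simp [pvScan]
  | cons c rest ih =>
    by_cases h : c = ch
    · subst h
      simp only [pvScan, beq_self_eq_true, if_true, List.mem_cons, true_or, not_true_eq_false,
        iff_false]
      omega
    · simp only [pvScan, beq_iff_eq, if_neg h, ih (b + 1) (by omega), List.mem_cons, not_or]
      constructor
      · intro hn; exact ⟨fun he => h he.symm, hn⟩
      · exact And.right


lemma pvScan_bounds (l : List Char) (ch : Char) (b : Int) (hb : 0 ≤ b) (hm : ch ∈ l) :
    b ≤ pvScan l ch b ∧ pvScan l ch b < b + l.length := by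
  induction l generalizing b with
  | nil => simp at hm
  | cons c rest ih =>
    by_cases h : c = ch
    · subst h
      simp only [pvScan, beq_self_eq_true, if_true, List.length_cons]
      push_cast; omega
    · have hm' : ch ∈ rest := by
        rcases List.mem_cons.mp hm with h' | h'
        · exact absurd h'.symm h
        · exact h'
      have := ih (b + 1) (by omega) hm'
      simp only [pvScan, beq_iff_eq, if_neg h, List.length_cons]
      push_cast at this ⊢
      omega

-- the table lemma: for lowercase S and ch, nxt[p][ord ch - 97] is B's forward scan from position p
lemma pvNxt_lookup (s : List Char) (hs : ∀ c ∈ s, 97 ≤ c.toNat ∧ c.toNat ≤ 122)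
    (ch : Char) (hch : 97 ≤ ch.toNat ∧ ch.toNat ≤ 122) (b : Int) (p : Nat) (hp : p ≤ s.length) :
    pvNxtGet (pvBuildNxt s b) (p : Int) ((ch.toNat : Int) - 97) = pvScan (s.drop p) ch (b + p) := by
  induction s generalizing b p with
  | nil =>
    have hp0 : p = 0 := Nat.le_zero.mp (by simpa using hp)
    subst hp0
    have hslotch : ((ch.toNat : Int) - 97) = ((ch.toNat - 97 : Nat) : Int) := by omega
    simp only [pvBuildNxt, pvNxtGet, Nat.cast_zero, PySem.List.pyGet?_zero_cons,
      Option.getD_some, List.drop_nil, pvScan]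
    rw [hslotch, PySem.List.pyGet?_natCast, List.getElem?_replicate, if_pos (by omega)]
    rfl
  | cons c rest ih =>
    have hc := hs c List.mem_cons_self
    have hrest : ∀ x ∈ rest, 97 ≤ x.toNat ∧ x.toNat ≤ 122 := fun x hx => hs x (List.mem_cons_of_mem c hx)
    cases p with
    | zero =>
      have hslotc : ((c.toNat : Int) - 97) = ((c.toNat - 97 : Nat) : Int) := by omega
      have hslotch : ((ch.toNat : Int) - 97) = ((ch.toNat - 97 : Nat) : Int) := by omega
      obtain ⟨r0, rs, hrz⟩ : ∃ r0 rs, pvBuildNxt rest (b + 1) = r0 :: rs := by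
        cases h : pvBuildNxt rest (b + 1) with
        | nil => exact absurd h (pvBuildNxt_ne_nil rest (b + 1))
        | cons r0 rs => exact ⟨r0, rs, rfl⟩
      have hr0len : r0.length = 26 := by
        apply pvBuildNxt_row_len rest (b + 1); rw [hrz]; exact List.mem_cons_self
      simp only [pvBuildNxt, pvNxtGet, hrz, List.headD_cons, Nat.cast_zero,
        PySem.List.pyGet?_zero_cons, Option.getD_some, List.drop_zero]
      rw [hslotc, PySem.List.pySetD_natCast]
      by_cases hcc : c = ch
      · subst hcc
        rw [hslotch, PySem.List.pyGet?_natCast, List.getElem?_set_self (by omega)]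
        simp [pvScan]
      · have hnetoNat : c.toNat ≠ ch.toNat := fun h => hcc (Char.ext (by
          exact_mod_cast UInt32.toNat_inj.mp h))
        have hneslot : (c.toNat - 97 : Nat) ≠ (ch.toNat - 97 : Nat) := by omega
        rw [hslotch, PySem.List.pyGet?_natCast, List.getElem?_set_ne hneslot]
        have hih := ih hrest (b + 1) 0 (by omega)
        simp only [pvNxtGet, hrz, Nat.cast_zero, PySem.List.pyGet?_zero_cons,
          Option.getD_some, List.drop_zero, add_zero] at hih
        rw [hslotch, PySem.List.pyGet?_natCast] at hih
        rw [hih]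
        simp only [pvScan, beq_iff_eq, if_neg hcc]
        ring_nf
    | succ p' =>
      have hstep : PySem.List.pyGet? (pvBuildNxt (c :: rest) b) (((p' + 1 : Nat) : Int))
          = PySem.List.pyGet? (pvBuildNxt rest (b + 1)) ((p' : Nat) : Int) := by
        simp only [pvBuildNxt]
        rw [PySem.List.pyGet?_natCast, PySem.List.pyGet?_natCast]
        simp
      have hih := ih hrest (b + 1) p' (by simpa using hp)
      simp only [pvNxtGet] at hih ⊢
      rw [hstep, hih]
      simp only [List.drop_succ_cons]
      congr 1
      push_cast
      ring

-- one loop iteration: the two step functions agree and keep pos a Nat bounded by |S|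
lemma pvStep_eq (s : List Char) (hs : ∀ c ∈ s, 97 ≤ c.toNat ∧ c.toNat ≤ 122)
    (ch : Char) (hch : ch ∈ s) (days : Int) (pos : Nat) (hpos : pos ≤ s.length) :
    ∃ (days' : Int) (pos' : Nat), pos' ≤ s.length ∧
      pvStepA (s.length : Int) (pvBuildNxt s 0) (days, (pos : Int)) ch = (days', (pos' : Int)) ∧
      pvStepB s (days, (pos : Int)) ch = (days', (pos' : Int)) := by
  have hchl : 97 ≤ ch.toNat ∧ ch.toNat ≤ 122 := hs ch hch
  have htbl0 : pvNxtGet (pvBuildNxt s 0) ((0 : Nat) : Int) ((ch.toNat : Int) - 97) = pvScan s ch 0 := by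
    simpa using pvNxt_lookup s hs ch hchl 0 0 (by omega)
  simp only [Nat.cast_zero] at htbl0
  have h0 := pvScan_bounds s ch 0 (by omega) hch
  by_cases hend : pos = s.length
  · subst hend
    have hv : pvScan s ch 0 != -1 := by simp; omega
    refine ⟨days + 1, (pvScan s ch 0).toNat + 1, by omega, ?_, ?_⟩
    · simp only [pvStepA, beq_self_eq_true, if_true, htbl0, hv, Prod.mk.injEq]
      refine ⟨by trivial, by push_cast; omega⟩
    · simp only [pvStepB, Int.toNat_natCast, List.drop_length, pvScan, beq_self_eq_true, if_true,
        Prod.mk.injEq]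
      refine ⟨by trivial, by push_cast; omega⟩
  · have hlt : pos < s.length := lt_of_le_of_ne hpos hend
    have hne : (((pos : Nat) : Int) == ((s.length : Nat) : Int)) = false := by
      simp; omega
    have htbl : pvNxtGet (pvBuildNxt s 0) ((pos : Nat) : Int) ((ch.toNat : Int) - 97)
        = pvScan (s.drop pos) ch ((pos : Nat) : Int) := by
      simpa using pvNxt_lookup s hs ch hchl 0 pos hpos
    by_cases hmem : ch ∈ s.drop pos
    · have hb := pvScan_bounds (s.drop pos) ch ((pos : Nat) : Int) (by omega) hmem
      rw [List.length_drop] at hb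
      have hv : pvScan (s.drop pos) ch ((pos : Nat) : Int) != -1 := by simp; omega
      refine ⟨days, (pvScan (s.drop pos) ch ((pos : Nat) : Int)).toNat + 1, by omega, ?_, ?_⟩
      · simp only [pvStepA, hne, if_false, Bool.false_eq_true, htbl, hv, if_true, Prod.mk.injEq]
        refine ⟨by trivial, by push_cast; omega⟩
      · simp only [pvStepB, Int.toNat_natCast]
        rw [if_neg (by simp; omega)]
        simp only [Prod.mk.injEq]
        refine ⟨by trivial, by push_cast; omega⟩
    · have hv : pvScan (s.drop pos) ch ((pos : Nat) : Int) = -1 :=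
        (pvScan_eq_neg_one_iff (s.drop pos) ch _ (by omega)).mpr hmem
      refine ⟨days + 1, (pvScan s ch 0).toNat + 1, by omega, ?_, ?_⟩
      · simp only [pvStepA, hne, if_false, Bool.false_eq_true, htbl, hv]
        rw [if_neg (by simp)]
        simp only [Prod.mk.injEq]
        
        refine ⟨by trivial, by push_cast; omega⟩
      · simp only [pvStepB, Int.toNat_natCast, hv]
        rw [if_pos (by simp)]
        simp only [Prod.mk.injEq]
        refine ⟨by trivial, by push_cast; omega⟩

lemma pvFold_eq (s : List Char) (hs : ∀ c ∈ s, 97 ≤ c.toNat ∧ c.toNat ≤ 122)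
    (t : List Char) (ht : ∀ ch ∈ t, ch ∈ s) :
    ∀ (days : Int) (pos : Nat), pos ≤ s.length →
      t.foldl (pvStepA (s.length : Int) (pvBuildNxt s 0)) (days, (pos : Int))
        = t.foldl (pvStepB s) (days, (pos : Int)) := by
  induction t with
  | nil => intro days pos _; rfl
  | cons ch rest ih =>
    intro days pos hpos
    obtain ⟨days2, pos2, hle, hA, hB⟩ :=
      pvStep_eq s hs ch (ht ch List.mem_cons_self) days pos hpos
    simp only [List.foldl_cons, hA, hB]
    exact ih (fun c hc => ht c (List.mem_cons_of_mem ch hc)) days2 pos2 hle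

-- ===== VERDICT (by name: the statements are the Claim_ definitions above) =====
theorem number_of_days_when_subsequence_spec : Claim_equal_number_of_days_when_subsequence := by
  unfold Claim_equal_number_of_days_when_subsequence
  intro S T _ hpre
  unfold Pre_number_of_days_when_subsequence at hpre
  simp only [List.all_eq_true, decide_eq_true_eq] at hpre
  unfold Spec_number_of_days_when_subsequence
  simp only [number_of_days_when_subsequence, number_of_days_when_subsequence_alt]
  by_cases hmiss : T.toList.any (fun ch => !(S.toList.contains ch)) = true
  · rw [if_pos hmiss, if_pos hmiss]
  · rw [if_neg hmiss, if_neg hmiss]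
    have ht : ∀ ch ∈ T.toList, ch ∈ S.toList := by
      intro ch hch
      by_contra hnm
      exact hmiss (List.any_eq_true.mpr ⟨ch, hch, by simp [hnm]⟩)
    have hf := pvFold_eq S.toList hpre T.toList ht 1 0 (by omega)
    simp only [Nat.cast_zero] at hf
    rw [hf]
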